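-- pv_equiv track=rewrite | github.com/SeayInsights/dream-studio | skills/generate-catalog.py | generate_health_dashboard
-- ===== SOURCE A (Python) =====
-- from collections import defaultdict
--
-- def generate_health_dashboard(skills):
--     """Generate Health Dashboard section."""
--     output = ["## Health Dashboard\n"]
--
--     # Count by health status
--     health_counts = defaultdict(int)
--     status_counts = defaultdict(int)
--
--     for skill in skills:
--         health = skill.get('health', 'unknown')
--         status = skill.get('status', 'unknown')
--         health_counts[health] += 1
--         status_counts[status] += 1
--
--     output.append("### By Health Status\n")
--     for health in ['active', 'maintenance', 'deprecated']:
--         count = health_counts.get(health, 0)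
--         icon = "✅" if health == "active" else "⚠️" if health == "maintenance" else "❌"
--         output.append(f"- {health.title()}: {count} skills {icon}\n")
--     output.append("\n")
--
--     output.append("### By Development Status\n")
--     for status in ['stable', 'tested', 'experimental', 'deprecated']:
--         count = status_counts.get(status, 0)
--         output.append(f"- {status.title()}: {count} skills\n")
--     output.append("\n")
--
--     return ''.join(output)
-- ===== SOURCE B (Python) =====
-- def generate_health_dashboard(skills):
--     """Generate Health Dashboard section."""
--     out = "## Health Dashboard\n### By Health Status\n"
--     for health in ['active', 'maintenance', 'deprecated']:
--         count = sum(1 for s in skills if s.get('health', 'unknown') == health)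
--         icon = "✅" if health == "active" else "⚠️" if health == "maintenance" else "❌"
--         out += f"- {health.title()}: {count} skills {icon}\n"
--     out += "\n### By Development Status\n"
--     for status in ['stable', 'tested', 'experimental', 'deprecated']:
--         count = sum(1 for s in skills if s.get('status', 'unknown') == status)
--         out += f"- {status.title()}: {count} skills\n"
--     out += "\n"
--     return out
-- ===== Notes on version B (the rewrite author's own statement) =====
-- stated objective: simpler
-- what changed: Drops the upfront counting pass and the two defaultdicts entirely: each of the seven fixed categories is counted on demand with a single generator-sum scan over the skills, and the result string is accumulated directly instead of joining a list of fragments.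
import Mathlib
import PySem

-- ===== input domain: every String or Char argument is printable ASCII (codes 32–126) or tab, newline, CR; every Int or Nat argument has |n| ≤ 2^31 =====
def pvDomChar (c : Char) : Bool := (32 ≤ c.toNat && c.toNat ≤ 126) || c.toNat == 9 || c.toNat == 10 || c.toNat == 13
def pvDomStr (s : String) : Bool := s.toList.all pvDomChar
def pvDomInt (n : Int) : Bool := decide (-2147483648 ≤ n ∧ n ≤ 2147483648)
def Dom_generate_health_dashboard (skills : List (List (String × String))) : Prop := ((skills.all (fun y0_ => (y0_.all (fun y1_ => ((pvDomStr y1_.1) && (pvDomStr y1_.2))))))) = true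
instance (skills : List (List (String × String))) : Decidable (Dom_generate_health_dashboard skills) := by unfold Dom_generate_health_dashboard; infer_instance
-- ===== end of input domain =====

-- B drops A's upfront defaultdict counting pass: each fixed category is counted by its own
-- scan over the skills, and the output string is accumulated directly instead of joined from a list.


-- shared port of Python's dict.get(k, dflt) on an association list (first match wins)
def skillGet (skill : List (String × String)) (k dflt : String) : String :=
  (((skill.find? (fun p => p.1 == k)).map Prod.snd).getD dflt)

-- hand port of str.title() (exact on the ASCII domain: a letter is uppercased after a
-- non-alphabetic character, lowercased otherwise); PySem has no title primitive
def titleChars : List Char → Bool → List Char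
  | [], _ => []
  | c :: cs, prevAlpha =>
      (if prevAlpha then PySem.Chars.lowerChar c else PySem.Chars.upperChar c)
        :: titleChars cs (PySem.Chars.isalpha c)

def pyTitle (s : String) : String := String.ofList (titleChars s.toList false)

-- ===== PORT A =====
def generate_health_dashboard (skills : List (List (String × String))) : String :=
  let output : List String := ["## Health Dashboard\n"]
  let counts := skills.foldl
    (fun (d : PySem.Dict String Int × PySem.Dict String Int) skill =>
      (d.1.modify (skillGet skill "health" "unknown") 0 (· + 1),
       d.2.modify (skillGet skill "status" "unknown") 0 (· + 1)))
    (PySem.Dict.empty, PySem.Dict.empty)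
  let health_counts := counts.1
  let status_counts := counts.2
  let output := output ++ ["### By Health Status\n"]
  let output := ["active", "maintenance", "deprecated"].foldl
    (fun out health =>
      let count := health_counts.getD health 0
      let icon : String :=
        if health == "active" then "✅" else if health == "maintenance" then "⚠️" else "❌"
      out ++ ["- " ++ pyTitle health ++ ": " ++ PySem.Int.toStr count ++ " skills " ++ icon ++ "\n"])
    output
  let output := output ++ ["\n"]
  let output := output ++ ["### By Development Status\n"]
  let output := ["stable", "tested", "experimental", "deprecated"].foldl
    (fun out status =>
      out ++ ["- " ++ pyTitle status ++ ": " ++ PySem.Int.toStr (status_counts.getD status 0) ++ " skills\n"])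
    output
  let output := output ++ ["\n"]
  PySem.Str.join "" output

-- ===== PORT B =====
-- sum(1 for s in skills if s.get(key, 'unknown') == v)
def countMatching (skills : List (List (String × String))) (key v : String) : Int :=
  ((skills.filter (fun s => skillGet s key "unknown" == v)).length : Int)

def generate_health_dashboard_alt (skills : List (List (String × String))) : String :=
  let out : String := "## Health Dashboard\n### By Health Status\n"
  let out := ["active", "maintenance", "deprecated"].foldl
    (fun out health =>
      let count := countMatching skills "health" health
      let icon : String :=
        if health == "active" then "✅" else if health == "maintenance" then "⚠️" else "❌"
      out ++ ("- " ++ pyTitle health ++ ": " ++ PySem.Int.toStr count ++ " skills " ++ icon ++ "\n"))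
    out
  let out := out ++ "\n### By Development Status\n"
  let out := ["stable", "tested", "experimental", "deprecated"].foldl
    (fun out status =>
      out ++ ("- " ++ pyTitle status ++ ": " ++ PySem.Int.toStr (countMatching skills "status" status) ++ " skills\n"))
    out
  out ++ "\n"

-- ===== PRECONDITION & SPEC =====
def Spec_generate_health_dashboard (skills : List (List (String × String))) (out : String) : Prop := out = generate_health_dashboard_alt skills
instance (skills : List (List (String × String))) (out : String) : Decidable (Spec_generate_health_dashboard skills out) := by unfold Spec_generate_health_dashboard; infer_instance

-- ===== CLAIM (what is proved, stated in full; the proofs are below) =====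
def Claim_equal_generate_health_dashboard : Prop := ∀ (skills : List (List (String × String))), Dom_generate_health_dashboard skills → Spec_generate_health_dashboard skills (generate_health_dashboard skills)

-- ===== LEMMAS AND PROOFS =====

-- A's single loop over a PAIR of dicts is the pair of the two one-dict loops
theorem fold_pair (skills : List (List (String × String)))
    (d1 d2 : PySem.Dict String Int) :
    skills.foldl
      (fun (d : PySem.Dict String Int × PySem.Dict String Int) skill =>
        (d.1.modify (skillGet skill "health" "unknown") 0 (· + 1),
         d.2.modify (skillGet skill "status" "unknown") 0 (· + 1)))
      (d1, d2)
    = (skills.foldl (fun d skill => d.modify (skillGet skill "health" "unknown") 0 (· + 1)) d1,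
       skills.foldl (fun d skill => d.modify (skillGet skill "status" "unknown") 0 (· + 1)) d2) := by
  induction skills generalizing d1 d2 with
  | nil => rfl
  | cons s rest ih => simp [List.foldl, ih]

-- the defaultdict count A looks up equals B's on-the-fly filter count
theorem count_eq (skills : List (List (String × String))) (key v : String) :
    (skills.foldl (fun d skill => d.modify (skillGet skill key "unknown") 0 (· + 1))
        (PySem.Dict.empty : PySem.Dict String Int)).getD v 0
    = countMatching skills key v := by
  rw [show (List.foldl (fun d skill => d.modify (skillGet skill key "unknown") 0 (· + 1))
        (PySem.Dict.empty : PySem.Dict String Int) skills)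
      = (skills.map (fun skill => skillGet skill key "unknown")).foldl
          (fun d x => d.modify x 0 (· + 1)) PySem.Dict.empty by rw [List.foldl_map]]
  rw [PySem.Dict.getD_foldl_modify_add_one]
  simp [countMatching, List.count_eq_countP, List.countP_eq_length_filter, List.filter_map,
        Function.comp_def]

theorem join_empty_nil : PySem.Str.join "" ([] : List String) = "" := by
  simp [PySem.Str.join, PySem.Chars.join, List.intercalate]

theorem join_empty_cons (x : String) (xs : List String) :
    PySem.Str.join "" (x :: xs) = x ++ PySem.Str.join "" xs := by
  cases xs with
  | nil => simp [PySem.Str.join, PySem.Chars.join, List.intercalate]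
  | cons y ys =>
      simp [PySem.Str.join, PySem.Chars.join, List.intercalate, String.ofList_append]

-- ===== VERDICT (by name: the statement is the Claim_ definition above) =====
theorem generate_health_dashboard_spec : Claim_equal_generate_health_dashboard := by
  intro skills _
  show generate_health_dashboard skills = generate_health_dashboard_alt skills
  unfold generate_health_dashboard generate_health_dashboard_alt
  rw [fold_pair]
  simp only [List.foldl]
  rw [count_eq, count_eq, count_eq, count_eq, count_eq, count_eq, count_eq]
  simp only [List.cons_append, List.nil_append]
  simp only [join_empty_cons, join_empty_nil]
  apply String.toList_inj.mp
  simp [String.toList_append, List.append_assoc]
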